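-- pv_equiv track=rewrite | github.com/ltvmoon/evidencelab | ui/backend/utils/highlight_helpers.py | build_clean_text_index_map
-- ===== SOURCE A (Python) =====
-- from typing import Any, Dict, List, Optional, Tuple
--
-- def build_clean_text_index_map(text: str) -> tuple[str, list[int]]:
--     clean_chars: List[str] = []
--     index_map: List[int] = []
--     i = 0
--     n = len(text)
--     while i < n:
--         if text[i] == "<":
--             j = text.find(">", i)
--             if j != -1:
--                 i = j + 1
--                 continue
--         clean_chars.append(text[i])
--         index_map.append(i)
--         i += 1
--     index_map.append(n)
--     return "".join(clean_chars), index_map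
-- ===== SOURCE B (Python) =====
-- def build_clean_text_index_map(text: str) -> tuple[str, list[int]]:
--     n = len(text)
--     clean_parts = []
--     index_map = []
--     last = 0
--     while True:
--         lt = text.find("<", last)
--         if lt == -1:
--             break
--         gt = text.find(">", lt)
--         if gt == -1:
--             break
--         clean_parts.append(text[last:lt])
--         index_map.extend(range(last, lt))
--         last = gt + 1
--     clean_parts.append(text[last:])
--     index_map.extend(range(last, n))
--     index_map.append(n)
--     return "".join(clean_parts), index_map
-- ===== Notes on version B (the rewrite author's own statement) =====
-- stated objective: faster
-- what changed: Replaces A's char-by-char while-loop (testing each char and calling find('>') inline) with a segment-wise pass that jumps from tag to tag with find('<')/find('>') and emits each inter-tag gap as one slice plus an extend(range(...)) of indices, doing O(1) Python-level steps per segment instead of per character.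
import Mathlib
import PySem

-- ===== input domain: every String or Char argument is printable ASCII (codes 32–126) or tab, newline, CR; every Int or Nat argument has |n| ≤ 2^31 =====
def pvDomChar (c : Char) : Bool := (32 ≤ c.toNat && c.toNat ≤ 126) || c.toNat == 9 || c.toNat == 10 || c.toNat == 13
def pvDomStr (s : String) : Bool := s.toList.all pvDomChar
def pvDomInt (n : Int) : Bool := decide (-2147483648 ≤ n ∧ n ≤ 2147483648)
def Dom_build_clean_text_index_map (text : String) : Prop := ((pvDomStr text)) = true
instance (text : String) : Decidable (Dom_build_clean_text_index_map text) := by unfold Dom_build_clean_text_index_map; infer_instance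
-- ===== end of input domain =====

-- B rewrites A's char-by-char scan as a segment-wise pass: jump between tag spans with find("<",last)/find(">",lt)
-- and emit whole inter-tag slices (and index ranges) at once — objective: alternative, same return value.
-- (fuel = len(text)+1 in both loops is only a totality guard: the cursor advances by at least one per iteration,
-- so the fuel never runs out on the initial call; the fuel-0 branch repeats the loop-exit result.)

-- ===== PORT A =====
-- the while-loop of A: state (i, clean_chars, index_map); branches in Python's order
def pvALoop (cs : List Char) : Nat → Nat → List Char → List Int → List Char × List Int
  | 0, _, clean, idx => (clean, idx ++ [(cs.length : Int)])
  | fuel + 1, i, clean, idx =>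
    if h : i < cs.length then
      if cs[i] = '<' then
        if PySem.Chars.findFrom cs ['>'] (i : Int) ≠ -1 then
          pvALoop cs fuel ((PySem.Chars.findFrom cs ['>'] (i : Int)).toNat + 1) clean idx
        else
          pvALoop cs fuel (i + 1) (clean ++ [cs[i]]) (idx ++ [(i : Int)])
      else
        pvALoop cs fuel (i + 1) (clean ++ [cs[i]]) (idx ++ [(i : Int)])
    else
      (clean, idx ++ [(cs.length : Int)])

def build_clean_text_index_map (text : String) : String × List Int :=
  let r := pvALoop text.toList (text.toList.length + 1) 0 [] []
  (String.ofList r.1, r.2)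

-- ===== PORT B =====
-- the post-loop tail of B: final gap text[last:], range(last,n) and the sentinel n
def pvBFinish (cs : List Char) (last : Nat) (parts : List Char) (idx : List Int) : List Char × List Int :=
  (parts ++ cs.drop last,
   idx ++ PySem.List.pyRange (last : Int) (cs.length : Int) ++ [(cs.length : Int)])

-- the while-loop of B: find the next "<...>" span, emit the gap slice and its index range, jump past it
def pvBLoop (cs : List Char) : Nat → Nat → List Char → List Int → List Char × List Int
  | 0, last, parts, idx => pvBFinish cs last parts idx
  | fuel + 1, last, parts, idx =>
    if PySem.Chars.findFrom cs ['<'] (last : Int) = -1 then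
      pvBFinish cs last parts idx
    else
      if PySem.Chars.findFrom cs ['>'] (PySem.Chars.findFrom cs ['<'] (last : Int)) = -1 then
        pvBFinish cs last parts idx
      else
        pvBLoop cs fuel
          ((PySem.Chars.findFrom cs ['>'] (PySem.Chars.findFrom cs ['<'] (last : Int))).toNat + 1)
          (parts ++ PySem.List.slice cs (some (last : Int)) (some (PySem.Chars.findFrom cs ['<'] (last : Int))))
          (idx ++ PySem.List.pyRange (last : Int) (PySem.Chars.findFrom cs ['<'] (last : Int)))

def build_clean_text_index_map_alt (text : String) : String × List Int :=
  let r := pvBLoop text.toList (text.toList.length + 1) 0 [] []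
  (String.ofList r.1, r.2)

-- ===== PRECONDITION & SPEC =====
def Spec_build_clean_text_index_map (text : String) (out : String × List Int) : Prop := out = build_clean_text_index_map_alt text
instance (text : String) (out : String × List Int) : Decidable (Spec_build_clean_text_index_map text out) := by unfold Spec_build_clean_text_index_map; infer_instance

-- ===== CLAIM (what is proved, stated in full; the proofs are below) =====
def Claim_equal_build_clean_text_index_map : Prop := ∀ (text : String), Dom_build_clean_text_index_map text → Spec_build_clean_text_index_map text (build_clean_text_index_map text)

-- ===== LEMMAS AND PROOFS =====

-- single-char prefix of a drop ↔ the char at that index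
theorem pvSingleton_prefix_drop (l : List Char) (c : Char) (m : Nat) (hm : m < l.length) :
    [c] <+: l.drop m ↔ l[m] = c := by
  rw [List.drop_eq_getElem_cons hm]
  constructor
  · rintro ⟨t, ht⟩
    have := (List.cons.injEq _ _ _ _).mp ht
    exact this.1.symm
  · rintro rfl; exact ⟨_, rfl⟩

-- find(c, k) = -1 means: no c at any position ≥ k
theorem pvFind_none (cs : List Char) (c : Char) (k : Nat) (hk : k ≤ cs.length)
    (h : PySem.Chars.findFrom cs [c] (k : Int) = -1) :
    ∀ m, k ≤ m → (hm : m < cs.length) → cs[m] ≠ c := by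
  intro m hkm hm hc
  rw [PySem.Chars.findFrom_natCast_eq_neg_one_iff cs [c] k hk] at h
  apply h
  rw [List.singleton_infix_iff]
  have : cs[m] ∈ cs.drop k := by
    rw [List.mem_iff_getElem]
    exact ⟨m - k, by simp [List.length_drop]; omega, by rw [List.getElem_drop]; congr 1; omega⟩
  rwa [hc] at this

-- find(c, k) = j ≠ -1 means: k ≤ j < n, cs[j] = c, and no c in [k, j)
theorem pvFind_some (cs : List Char) (c : Char) (k : Nat) (hk : k ≤ cs.length)
    (h : PySem.Chars.findFrom cs [c] (k : Int) ≠ -1) :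
    k ≤ (PySem.Chars.findFrom cs [c] (k : Int)).toNat ∧
    (PySem.Chars.findFrom cs [c] (k : Int)).toNat < cs.length ∧
    (∀ hj : (PySem.Chars.findFrom cs [c] (k : Int)).toNat < cs.length,
      cs[(PySem.Chars.findFrom cs [c] (k : Int)).toNat] = c) ∧
    (∀ m, k ≤ m → m < (PySem.Chars.findFrom cs [c] (k : Int)).toNat →
      (hm : m < cs.length) → cs[m] ≠ c) := by
  have hk2 := PySem.Chars.findFrom_natCast_spec cs [c] k hk h
  obtain ⟨t, ht⟩ := hk2.2.1
  have hlen := congrArg List.length ht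
  simp [List.length_drop] at hlen
  have hjl : (PySem.Chars.findFrom cs [c] (k : Int)).toNat < cs.length := by omega
  refine ⟨by have := hk2.1; omega, hjl, ?_, ?_⟩
  · intro _
    exact (pvSingleton_prefix_drop cs c _ hjl).mp ⟨t, ht⟩
  · intro m hkm hmj hm hc
    exact hk2.2.2 m hkm hmj ((pvSingleton_prefix_drop cs c m hm).mpr hc)

-- a nonneg result of find is its own toNat cast
theorem pvFind_cast (cs : List Char) (c : Char) (k : Nat) (hk : k ≤ cs.length)
    (h : PySem.Chars.findFrom cs [c] (k : Int) ≠ -1) :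
    PySem.Chars.findFrom cs [c] (k : Int)
      = ((PySem.Chars.findFrom cs [c] (k : Int)).toNat : Int) := by
  have hk2 := PySem.Chars.findFrom_natCast_spec cs [c] k hk h
  rw [Int.toNat_of_nonneg (le_trans (by omega) hk2.1)]

-- past the end the loop-exit and fuel-0 results coincide
theorem pvALoop_terminal (cs : List Char) (f : Nat) (clean : List Char) (idx : List Int) :
    pvALoop cs f cs.length clean idx = (clean, idx ++ [(cs.length : Int)]) := by
  cases f with
  | zero => rfl
  | succ f => rw [pvALoop, dif_neg (by omega)]

-- A copies the tag-free gap [i, i+d) verbatim, one char and one index at a time (consuming exactly d fuel)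
theorem pvALoop_gap (cs : List Char) (d : Nat) :
    ∀ (i : Nat) (f : Nat) (clean : List Char) (idx : List Int), i + d ≤ cs.length →
    (∀ m, i ≤ m → m < i + d → (hm : m < cs.length) → cs[m] ≠ '<') →
    pvALoop cs (f + d) i clean idx =
      pvALoop cs f (i + d) (clean ++ (cs.drop i).take d) (idx ++ PySem.List.pyRange (i : Int) ((i + d : Nat) : Int)) := by
  induction d with
  | zero => intro i f clean idx _ _; simp
  | succ d ih =>
    intro i f clean idx hle hno
    have hi : i < cs.length := by omega
    have hfs : f + (d + 1) = (f + d) + 1 := by omega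
    rw [hfs, pvALoop, dif_pos hi, if_neg (hno i (le_refl i) (by omega) hi)]
    rw [ih (i + 1) f _ _ (by omega) (fun m h1 h2 hm => hno m (by omega) (by omega) hm)]
    have hdrop : (cs.drop i).take (d + 1) = cs[i] :: (cs.drop (i + 1)).take d := by
      rw [List.drop_eq_getElem_cons hi, List.take_succ_cons]
    have hrange : PySem.List.pyRange (i : Int) ((i + (d + 1) : Nat) : Int)
        = (i : Int) :: PySem.List.pyRange ((i + 1 : Nat) : Int) ((i + 1 + d : Nat) : Int) := by
      rw [PySem.List.pyRange_one_cons (by omega)]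
      push_cast
      ring_nf
    rw [hdrop, hrange]
    have harg : i + 1 + d = i + (d + 1) := by omega
    simp [harg]

-- with no '>' from position i on, A keeps every remaining char (tags can no longer close)
theorem pvALoop_nogt (cs : List Char) (d : Nat) :
    ∀ (i : Nat) (f : Nat) (clean : List Char) (idx : List Int), i + d = cs.length →
    PySem.Chars.findFrom cs ['>'] (i : Int) = -1 →
    pvALoop cs (f + d) i clean idx =
      (clean ++ cs.drop i, idx ++ PySem.List.pyRange (i : Int) (cs.length : Int) ++ [(cs.length : Int)]) := by
  induction d with
  | zero =>
    intro i f clean idx hd _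
    have hi : i = cs.length := by omega
    subst hi
    rw [Nat.add_zero, pvALoop_terminal]
    simp
  | succ d ih =>
    intro i f clean idx hd hfind
    have hi : i < cs.length := by omega
    have hnext : PySem.Chars.findFrom cs ['>'] ((i + 1 : Nat) : Int) = -1 := by
      rw [PySem.Chars.findFrom_natCast_eq_neg_one_iff cs ['>'] (i+1) (by omega)]
      rw [PySem.Chars.findFrom_natCast_eq_neg_one_iff cs ['>'] i (by omega)] at hfind
      intro hinf
      apply hfind
      rw [List.singleton_infix_iff] at hinf ⊢
      have : cs.drop (i + 1) = (cs.drop i).tail := by simp [List.tail_drop]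
      rw [this] at hinf
      exact List.mem_of_mem_tail hinf
    have hfs : f + (d + 1) = (f + d) + 1 := by omega
    have hstep : pvALoop cs ((f + d) + 1) i clean idx
        = pvALoop cs (f + d) (i + 1) (clean ++ [cs[i]]) (idx ++ [(i : Int)]) := by
      rw [pvALoop, dif_pos hi]
      by_cases hc : cs[i] = '<'
      · rw [if_pos hc, if_neg (by simpa using hfind)]
      · rw [if_neg hc]
    rw [hfs, hstep, ih (i + 1) f _ _ (by omega) hnext]
    have hdrop : cs[i] :: cs.drop (i + 1) = cs.drop i := (List.drop_eq_getElem_cons hi).symm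
    have hrange : PySem.List.pyRange (i : Int) (cs.length : Int)
        = (i : Int) :: PySem.List.pyRange ((i + 1 : Nat) : Int) (cs.length : Int) := by
      rw [PySem.List.pyRange_one_cons (by omega)]
      push_cast
      ring_nf
    rw [hrange, ← hdrop]
    simp

-- main equivalence: from any cursor position, with any sufficient fuel, the two loops agree
theorem pvLoop_eq (cs : List Char) (k : Nat) :
    ∀ (i fA fB : Nat) (clean : List Char) (idx : List Int),
    i ≤ cs.length → cs.length - i < k → cs.length - i < fA → cs.length - i < fB →
    pvALoop cs fA i clean idx = pvBLoop cs fB i clean idx := by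
  induction k with
  | zero => intro i _ _ _ _ _ h; omega
  | succ k ih =>
    intro i fA fB clean idx hi hk hfA hfB
    obtain ⟨fB', rfl⟩ : ∃ fB', fB = fB' + 1 := ⟨fB - 1, by omega⟩
    by_cases hlt : PySem.Chars.findFrom cs ['<'] (i : Int) = -1
    · -- no tag opens: both copy the rest verbatim
      rw [pvBLoop, if_pos hlt, pvBFinish]
      have hno := pvFind_none cs '<' i hi hlt
      obtain ⟨f', rfl⟩ : ∃ f', fA = f' + (cs.length - i) := ⟨fA - (cs.length - i), by omega⟩
      rw [pvALoop_gap cs (cs.length - i) i f' clean idx (by omega) (fun m h1 h2 hm => hno m h1 hm)]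
      have harg : i + (cs.length - i) = cs.length := by omega
      rw [harg, pvALoop_terminal]
      simp
    · obtain ⟨hij, hjl, hcj, hmin⟩ := pvFind_some cs '<' i hi hlt
      have hjcast := pvFind_cast cs '<' i hi hlt
      set j := (PySem.Chars.findFrom cs ['<'] (i : Int)).toNat with hjdef
      -- A walks the gap [i, j) char by char; B emits it as one slice
      obtain ⟨f', hfA'⟩ : ∃ f', fA = (f' + 1) + (j - i) := ⟨fA - (j - i) - 1, by omega⟩
      rw [hfA', pvALoop_gap cs (j - i) i (f' + 1) clean idx (by omega)
        (fun m h1 h2 hm => hmin m h1 (by omega) hm)]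
      have harg : i + (j - i) = j := by omega
      rw [harg]
      by_cases hgt : PySem.Chars.findFrom cs ['>'] ((j : Nat) : Int) = -1
      · -- the tag never closes: everything from i on is kept
        rw [pvBLoop, if_neg hlt, hjcast, if_pos hgt, pvBFinish]
        obtain ⟨f'', hf''⟩ : ∃ f'', f' + 1 = f'' + (cs.length - j) := ⟨f' + 1 - (cs.length - j), by omega⟩
        rw [hf'', pvALoop_nogt cs (cs.length - j) j f'' _ _ (by omega) hgt]
        have hsplit : (cs.drop i).take (j - i) ++ cs.drop j = cs.drop i := by
          have : cs.drop j = (cs.drop i).drop (j - i) := by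
            rw [List.drop_drop]; congr 1; omega
          rw [this, List.take_append_drop]
        have hrsplit : PySem.List.pyRange (i : Int) (cs.length : Int)
            = PySem.List.pyRange (i : Int) ((j : Nat) : Int)
              ++ PySem.List.pyRange ((j : Nat) : Int) (cs.length : Int) :=
          PySem.List.pyRange_one_append _ _ _ (by omega) (by omega)
        simp [hsplit, hrsplit]
      · -- tag [j, g] skipped by both; recurse at g+1 with equal accumulators
        obtain ⟨hjg, hgl, _, _⟩ := pvFind_some cs '>' j (by omega) hgt
        rw [pvALoop, dif_pos hjl, if_pos (hcj hjl), if_pos hgt]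
        rw [pvBLoop, if_neg hlt, hjcast, if_neg hgt]
        rw [ih ((PySem.Chars.findFrom cs ['>'] ((j : Nat) : Int)).toNat + 1) f' fB' _ _
          (by omega) (by omega) (by omega) (by omega)]
        rw [PySem.List.slice_natCast]

-- ===== VERDICT (by name: the statement is the Claim_ definition above) =====
theorem build_clean_text_index_map_spec : Claim_equal_build_clean_text_index_map := by
  intro text _
  unfold Spec_build_clean_text_index_map build_clean_text_index_map build_clean_text_index_map_alt
  rw [pvLoop_eq text.toList (text.toList.length + 1) 0 (text.toList.length + 1) (text.toList.length + 1) [] [] (by omega) (by omega) (by omega) (by omega)]
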